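-- pv_equiv track=rewrite | github.com/gmgmgun/Algorithm-Exercises | 백준/Silver/1652. 누울 자리를 찾아라/누울 자리를 찾아라.py | find_sleeping_spots
-- ===== SOURCE A (Python) =====
-- def find_sleeping_spots(room):
--     length = len(room)
--     hor = 0
--     ver = 0
--
--     for row in room:
--         for space in row.split('X'):
--             if len(space) >= 2:
--                 hor += 1
--
--     for col in range(length):
--         col_space = ''.join(row[col] for row in room)
--         for space in col_space.split('X'):
--             if len(space) >= 2:
--                 ver += 1
--
--     return hor, ver
-- ===== SOURCE B (Python) =====
-- def find_sleeping_spots(room):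
--     n = len(room)
--     hor = 0
--     ver = 0
--     for row in room:
--         run = 0
--         for ch in row:
--             if ch != 'X':
--                 run += 1
--                 if run == 2:
--                     hor += 1
--             else:
--                 run = 0
--     for c in range(n):
--         run = 0
--         for row in room:
--             if row[c] != 'X':
--                 run += 1
--                 if run == 2:
--                     ver += 1
--             else:
--                 run = 0
--     return hor, ver
-- ===== Notes on version B (the rewrite author's own statement) =====
-- stated objective: alternative
-- what changed: Replaces A's split('X')-then-length-filter (with a per-column ''.join) by a single run-length state machine per row and per column that increments the count exactly when a run of non-'X' cells reaches length 2.
import Mathlib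
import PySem

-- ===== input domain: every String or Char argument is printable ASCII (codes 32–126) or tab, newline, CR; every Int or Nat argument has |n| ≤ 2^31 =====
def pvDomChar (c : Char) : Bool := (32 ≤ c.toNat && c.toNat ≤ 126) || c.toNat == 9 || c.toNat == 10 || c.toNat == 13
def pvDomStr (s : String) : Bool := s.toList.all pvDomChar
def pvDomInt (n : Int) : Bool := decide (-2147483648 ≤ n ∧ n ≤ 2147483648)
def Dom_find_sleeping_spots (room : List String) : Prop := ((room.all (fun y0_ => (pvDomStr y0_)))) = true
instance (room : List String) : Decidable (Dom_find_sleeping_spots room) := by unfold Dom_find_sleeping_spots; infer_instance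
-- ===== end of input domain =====

-- B counts a run at the moment it reaches length 2 with one state-machine pass per row/column,
-- instead of A's split('X') + length filter and per-column ''.join; same cost, different decomposition.

-- ===== PORT A =====
-- row.split('X') ported as List.splitOn 'X' on the code points: exact for a one-character separator.
-- row[col] ported with PySem.List.pyGetD (default unreachable: Pre_ puts col in range; Python raises IndexError outside Pre_).
def find_sleeping_spots (room : List String) : Int × Int :=
  let length : Int := (room.length : Int)
  let hor : Int :=
    room.foldl (fun hor row =>
      (row.toList.splitOn 'X').foldl
        (fun hor space => if 2 ≤ space.length then hor + 1 else hor) hor) 0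
  let ver : Int :=
    (PySem.List.pyRange 0 length 1).foldl (fun ver col =>
      let col_space : List Char := room.map (fun row => PySem.List.pyGetD row.toList col 'X')
      (col_space.splitOn 'X').foldl
        (fun ver space => if 2 ≤ space.length then ver + 1 else ver) ver) 0
  (hor, ver)

-- ===== PORT B =====
-- one step of B's run-length state machine: state = (count, current run)
def pvStep (p : Int × Nat) (ch : Char) : Int × Nat :=
  if ch ≠ 'X' then
    (if p.2 + 1 = 2 then p.1 + 1 else p.1, p.2 + 1)
  else (p.1, 0)

-- row[c] ported with PySem.List.pyGetD (default unreachable under Pre_; Python raises IndexError outside Pre_).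
def find_sleeping_spots_alt (room : List String) : Int × Int :=
  let n : Int := (room.length : Int)
  let hor : Int :=
    room.foldl (fun hor row => (row.toList.foldl pvStep (hor, 0)).1) 0
  let ver : Int :=
    (PySem.List.pyRange 0 n 1).foldl (fun ver c =>
      (room.foldl (fun p row => pvStep p (PySem.List.pyGetD row.toList c 'X')) (ver, 0)).1) 0
  (hor, ver)

-- ===== PRECONDITION & SPEC =====
-- Pre_ excludes exactly the ragged grids on which both Pythons raise IndexError: A (and B) index
-- row[col] for every col in range(len(room)), so every row must have at least len(room) characters.
def Pre_find_sleeping_spots (room : List String) : Prop :=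
  ∀ row ∈ room, room.length ≤ row.toList.length
instance (room : List String) : Decidable (Pre_find_sleeping_spots room) := by
  unfold Pre_find_sleeping_spots; infer_instance
def pvWitness_find_sleeping_spots : List String := ["..", ".X"]

def Spec_find_sleeping_spots (room : List String) (out : Int × Int) : Prop := out = find_sleeping_spots_alt room
instance (room : List String) (out : Int × Int) : Decidable (Spec_find_sleeping_spots room out) := by unfold Spec_find_sleeping_spots; infer_instance

-- ===== CLAIM (what is proved, stated in full; the proofs are below) =====
def Claim_equal_find_sleeping_spots : Prop := ∀ (room : List String), Dom_find_sleeping_spots room → Pre_find_sleeping_spots room → Spec_find_sleeping_spots room (find_sleeping_spots room)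

-- ===== LEMMAS AND PROOFS =====

-- length of the leading run of non-'X' characters
def pvHead (cs : List Char) : Nat := (cs.takeWhile (fun x => !(x == 'X'))).length

-- number of later (non-head) segments of length >= 2
def pvTail (cs : List Char) : Nat :=
  (cs.splitOnP (· == 'X')).tail.countP (fun sp => decide (2 ≤ sp.length))

-- splitOnP always yields the leading run as its head
theorem pv_splitOnP_head_tail (cs : List Char) :
    cs.splitOnP (· == 'X') =
      cs.takeWhile (fun x => !(x == 'X')) :: (cs.splitOnP (· == 'X')).tail := by
  induction cs with
  | nil => simp [List.splitOnP_nil]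
  | cons c cs ih =>
    by_cases hc : c = 'X'
    · subst hc; simp [List.splitOnP_cons]
    · rw [List.splitOnP_cons]
      simp only [beq_iff_eq, hc, if_false]
      rw [ih]
      simp [hc]

theorem pv_countP_total (cs : List Char) :
    (cs.splitOnP (· == 'X')).countP (fun sp => decide (2 ≤ sp.length)) =
      (if 2 ≤ pvHead cs then 1 else 0) + pvTail cs := by
  conv_lhs => rw [pv_splitOnP_head_tail cs]
  rw [List.countP_cons, pvTail, pvHead]
  simp only [decide_eq_true_eq]
  split_ifs with h <;> omega

theorem pv_head_consX (cs : List Char) : pvHead ('X' :: cs) = 0 := by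
  simp [pvHead]

theorem pv_head_cons (c : Char) (cs : List Char) (hc : ¬ c = 'X') :
    pvHead (c :: cs) = pvHead cs + 1 := by
  simp [pvHead, hc]

theorem pv_tail_consX (cs : List Char) :
    pvTail ('X' :: cs) = (if 2 ≤ pvHead cs then 1 else 0) + pvTail cs := by
  rw [pvTail, List.splitOnP_cons]
  simp only [beq_self_eq_true, if_true, List.tail_cons]
  exact pv_countP_total cs

theorem pv_tail_cons (c : Char) (cs : List Char) (hc : ¬ c = 'X') :
    pvTail (c :: cs) = pvTail cs := by
  rw [pvTail, List.splitOnP_cons]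
  simp only [beq_iff_eq, hc, if_false]
  conv_lhs => rw [pv_splitOnP_head_tail cs]
  simp [pvTail]

-- the state machine, started with run r, counts the segments of length >= 2
theorem pv_scan_eq (cs : List Char) (h : Int) (r : Nat) :
    (cs.foldl pvStep (h, r)).1 =
      h + (if r < 2 ∧ 2 ≤ r + pvHead cs then 1 else 0) + (pvTail cs : Int) := by
  induction cs generalizing h r with
  | nil =>
    have hp : pvHead ([] : List Char) = 0 := rfl
    rw [List.foldl_nil, if_neg (show ¬ (r < 2 ∧ 2 ≤ r + pvHead ([] : List Char)) by rw [hp]; omega), pvTail]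
    simp [List.splitOnP_nil]
  | cons c cs ih =>
    by_cases hc : c = 'X'
    · subst hc
      have hstep : pvStep (h, r) 'X' = (h, 0) := by simp [pvStep]
      rw [List.foldl_cons, hstep, ih, pv_head_consX, pv_tail_consX]
      split_ifs <;> omega
    · have hstep : pvStep (h, r) c = (if r + 1 = 2 then h + 1 else h, r + 1) := by
        simp [pvStep, hc]
      rw [List.foldl_cons, hstep, ih, pv_head_cons c cs hc, pv_tail_cons c cs hc]
      split_ifs <;> omega

-- per character list: B's scan from run 0 equals A's split-and-filter count
theorem pv_row_eq (cs : List Char) (h : Int) :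
    (cs.foldl pvStep (h, 0)).1 =
      (cs.splitOn 'X').foldl (fun acc sp => if 2 ≤ sp.length then acc + 1 else acc) h := by
  have hfold :
      (cs.splitOn 'X').foldl (fun acc sp => if 2 ≤ sp.length then acc + 1 else acc) h =
        h + ((cs.splitOn 'X').countP (fun sp => decide (2 ≤ sp.length)) : Int) := by
    exact PySem.List.foldl_ite_add_one (fun sp => 2 ≤ sp.length) (cs.splitOn 'X') h
  rw [hfold, pv_scan_eq cs h 0, List.splitOn, pv_countP_total cs]
  split_ifs <;> omega

-- ===== VERDICT (by name: the statement is the Claim_ definition above) =====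
theorem find_sleeping_spots_spec : Claim_equal_find_sleeping_spots := by
  intro room _ _
  unfold Spec_find_sleeping_spots find_sleeping_spots find_sleeping_spots_alt
  dsimp only
  have h1 : (fun (hor : Int) (row : String) => (row.toList.foldl pvStep (hor, 0)).1) =
      (fun (hor : Int) (row : String) =>
        (row.toList.splitOn 'X').foldl
          (fun hor space => if 2 ≤ space.length then hor + 1 else hor) hor) :=
    funext fun hor => funext fun row => pv_row_eq row.toList hor
  have h2 : (fun (ver : Int) (c : Int) =>
        (room.foldl (fun p row => pvStep p (PySem.List.pyGetD row.toList c 'X')) (ver, 0)).1) =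
      (fun (ver : Int) (c : Int) =>
        ((room.map (fun row => PySem.List.pyGetD row.toList c 'X')).splitOn 'X').foldl
          (fun ver space => if 2 ≤ space.length then ver + 1 else ver) ver) :=
    funext fun ver => funext fun c => by rw [← pv_row_eq, List.foldl_map]
  rw [h1, h2]
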